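-- pv_equiv track=rewrite | github.com/Habeomsu/BaekJoon | 삼성 sw 테스트/이차원 배열과 연산.py | new_sort
-- ===== SOURCE A (Python) =====
-- def new_sort(arr):
--     new_arr = []
--     dict = {}
--     temp = []
--     for i in arr:
--         if i==0:
--             continue
--         if i in dict:
--             dict[i] += 1
--         else:
--             dict[i] = 1
--     for j in dict:
--         temp.append([j,dict[j]])
--     temp = sorted(temp, key = lambda x:(x[1],x[0]))
--     for i in temp:
--         a,b = i
--         new_arr.append(a)
--         new_arr.append(b)
--         if len(new_arr) >= 100:
--             break
--     return new_arr[:100]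
-- ===== SOURCE B (Python) =====
-- def new_sort(arr):
--     vals = sorted(v for v in arr if v != 0)
--     buckets = {}
--     prev, run = 0, 0
--     for v in vals:
--         if run > 0 and v == prev:
--             run += 1
--         else:
--             if run > 0:
--                 buckets.setdefault(run, []).append(prev)
--             prev, run = v, 1
--     if run > 0:
--         buckets.setdefault(run, []).append(prev)
--     out = []
--     for c in sorted(buckets):
--         for v in buckets[c]:
--             out.append(v)
--             out.append(c)
--     return out[:100]
-- ===== Notes on version B (the rewrite author's own statement) =====
-- stated objective: alternative
-- what changed: B never sorts (value,count) pairs and never counts with a dict: it sorts the nonzero values once, run-length-scans them with a (prev,run) accumulator to bucket values by their multiplicity (count -> ascending value list), and emits the buckets in increasing-count order, so the (count,value) order is produced by bucketing instead of A's hash counting plus lexicographic pair sort.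
import Mathlib
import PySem

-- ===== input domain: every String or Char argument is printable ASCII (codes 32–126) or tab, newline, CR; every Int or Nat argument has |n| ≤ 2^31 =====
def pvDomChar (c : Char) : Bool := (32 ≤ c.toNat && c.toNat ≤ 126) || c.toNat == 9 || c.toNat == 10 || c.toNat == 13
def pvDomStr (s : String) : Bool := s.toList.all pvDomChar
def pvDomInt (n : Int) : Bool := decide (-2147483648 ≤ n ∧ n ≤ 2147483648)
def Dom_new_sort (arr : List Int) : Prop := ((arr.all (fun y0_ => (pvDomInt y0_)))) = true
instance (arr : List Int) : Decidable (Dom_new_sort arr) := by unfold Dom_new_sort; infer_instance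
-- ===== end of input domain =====

-- B sorts the nonzero values once, run-length-scans them to bucket values by multiplicity
-- (count -> ascending value list), and emits the buckets in increasing-count order:
-- no dict counting and no (count,value) pair sort. Objective: alternative decomposition, same result.

-- ===== PORT A =====
-- the flatten loop of A: append a then b, break once len(new_arr) >= 100
def pvFlattenA : List (Int × Int) → List Int → List Int
  | [], acc => acc
  | (a, b) :: rest, acc =>
      let acc' := acc ++ [a, b]
      if acc'.length ≥ 100 then acc' else pvFlattenA rest acc'

def new_sort (arr : List Int) : List Int :=
  -- for i in arr: skip 0; if i in dict: dict[i] += 1 else dict[i] = 1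
  let d : PySem.Dict Int Int := arr.foldl (fun d i =>
    if i = 0 then d
    else if d.contains i then d.insert i (d.getD i 0 + 1) else d.insert i 1) PySem.Dict.empty
  -- for j in dict: temp.append([j, dict[j]])
  let temp : List (Int × Int) := d.keys.map (fun j => (j, d.getD j 0))
  -- temp = sorted(temp, key=lambda x:(x[1],x[0]))
  let temp2 := PySem.List.sorted2 temp (fun x => x.2) (fun x => x.1)
  PySem.List.slice (pvFlattenA temp2 []) none (some 100)

-- ===== PORT B =====
-- buckets.setdefault(run, []).append(prev): buckets[run] = buckets.get(run, []) + [prev]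
def pvPush (b : PySem.Dict Int (List Int)) (c v : Int) : PySem.Dict Int (List Int) :=
  b.modify c [] (fun l => l ++ [v])

def new_sort_alt (arr : List Int) : List Int :=
  let vals := PySem.List.sorted (arr.filter (fun x => x ≠ 0)) (fun x => x)
  -- for v in vals: extend the current run or flush it into its count bucket
  let st := vals.foldl (fun (s : PySem.Dict Int (List Int) × Int × Int) v =>
      if s.2.2 > 0 ∧ v = s.2.1 then (s.1, s.2.1, s.2.2 + 1)
      else ((if s.2.2 > 0 then pvPush s.1 s.2.2 s.2.1 else s.1), v, 1))
    (PySem.Dict.empty, 0, 0)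
  -- final flush: if run > 0: buckets.setdefault(run, []).append(prev)
  let buckets := if st.2.2 > 0 then pvPush st.1 st.2.2 st.2.1 else st.1
  -- for c in sorted(buckets): for v in buckets[c]: out.append(v); out.append(c)
  let counts := PySem.List.sorted buckets.keys (fun c => c)
  let out := counts.foldl (fun out c =>
      (buckets.getD c []).foldl (fun o v => o ++ [v, c]) out) []
  PySem.List.slice out none (some 100)

-- ===== PRECONDITION & SPEC =====
def Spec_new_sort (arr : List Int) (out : List Int) : Prop := out = new_sort_alt arr
instance (arr : List Int) (out : List Int) : Decidable (Spec_new_sort arr out) := by unfold Spec_new_sort; infer_instance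

-- ===== CLAIM (what is proved, stated in full; the proofs are below) =====
def Claim_equal_new_sort : Prop := ∀ (arr : List Int), Dom_new_sort arr → Spec_new_sort arr (new_sort arr)

-- ===== LEMMAS AND PROOFS =====

-- run-length decomposition of a list (proof device for B's scan)
def pvRunsAux (v : Int) (c : Int) : List Int → List (Int × Int)
  | [] => [(v, c)]
  | x :: t => if x = v then pvRunsAux v (c + 1) t else (v, c) :: pvRunsAux x 1 t

def pvRuns : List Int → List (Int × Int)
  | [] => []
  | x :: t => pvRunsAux x 1 t

theorem pvRunsAux_eq (v c : Int) (t : List Int) :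
    pvRunsAux v c t
      = (v, c + ((t.takeWhile (· = v)).length : Int)) :: pvRuns (t.dropWhile (· = v)) := by
  induction t generalizing c with
  | nil => simp [pvRunsAux, pvRuns]
  | cons x t ih =>
    by_cases hx : x = v
    · subst hx
      simp only [pvRunsAux, List.takeWhile, List.dropWhile, decide_true,
        List.length_cons, ih]
      rw [if_pos trivial]
      congr 2
      push_cast
      ring
    · simp [pvRunsAux, hx, List.takeWhile, List.dropWhile, pvRuns]

theorem pvRuns_cons (x : Int) (t : List Int) :
    pvRuns (x :: t)
      = (x, 1 + ((t.takeWhile (· = x)).length : Int)) :: pvRuns (t.dropWhile (· = x)) := by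
  rw [show pvRuns (x :: t) = pvRunsAux x 1 t from rfl, pvRunsAux_eq]

-- on a nondecreasing list, every element of dropWhile (= x) exceeds x
theorem mem_dropWhile_gt (x : Int) (t : List Int) (ht : t.Pairwise (· ≤ ·))
    (hge : ∀ y ∈ t, x ≤ y) : ∀ y ∈ t.dropWhile (· = x), x < y := by
  induction t with
  | nil => simp
  | cons a t ih =>
    by_cases ha : a = x
    · subst ha
      rw [List.dropWhile_cons, if_pos (by simp)]
      exact ih ht.tail (fun y hy => hge y (List.mem_cons_of_mem _ hy))
    · rw [List.dropWhile_cons, if_neg (by simpa using ha)]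
      intro y hy
      rcases List.mem_cons.mp hy with rfl | hy'
      · exact lt_of_le_of_ne (hge y (List.mem_cons_self)) (fun h => ha h.symm)
      · exact lt_of_lt_of_le (lt_of_le_of_ne (hge a List.mem_cons_self) (fun h => ha h.symm))
          (List.rel_of_pairwise_cons ht hy')

-- on a nondecreasing list, pvRuns lists the distinct values paired with their counts
theorem pvRuns_spec (s : List Int) (hs : s.Pairwise (· ≤ ·)) :
    ((pvRuns s).map Prod.fst).Nodup ∧ (∀ v, v ∈ (pvRuns s).map Prod.fst ↔ v ∈ s) ∧
      pvRuns s = ((pvRuns s).map Prod.fst).map (fun v => (v, (s.count v : Int))) := by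
  match s with
  | [] => simp [pvRuns]
  | x :: t =>
    have hge : ∀ y ∈ t, x ≤ y := fun y hy => List.rel_of_pairwise_cons hs hy
    have hgt := mem_dropWhile_gt x t hs.tail hge
    have hdw : (t.dropWhile (· = x)).Pairwise (· ≤ ·) :=
      List.Pairwise.sublist (List.dropWhile_sublist _) hs.tail
    have hlen : (t.dropWhile (· = x)).length < (x :: t).length :=
      Nat.lt_succ_of_le (List.length_dropWhile_le _ _)
    obtain ⟨ih1, ih2, ih3⟩ := pvRuns_spec (t.dropWhile (· = x)) hdw
    have htw : ∀ y ∈ t.takeWhile (· = x), y = x := by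
      intro y hy
      simpa using List.mem_takeWhile_imp hy
    have hsplit : t = t.takeWhile (· = x) ++ t.dropWhile (· = x) :=
      (List.takeWhile_append_dropWhile).symm
    have hxnot : x ∉ t.dropWhile (· = x) := fun h => lt_irrefl x (hgt x h)
    have hcx : ((x :: t).count x : Int) = 1 + ((t.takeWhile (· = x)).length : Int) := by
      rw [List.count_cons_self]
      have : t.count x = (t.takeWhile (· = x)).count x + (t.dropWhile (· = x)).count x := by
        conv_lhs => rw [hsplit]
        exact List.count_append ..
      have h1 : (t.takeWhile (· = x)).count x = (t.takeWhile (· = x)).length :=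
        List.count_eq_length.mpr (fun y hy => (htw y hy).symm ▸ rfl)
      have h2 : (t.dropWhile (· = x)).count x = 0 := List.count_eq_zero.mpr hxnot
      omega
    have hcv : ∀ v, v ≠ x → (x :: t).count v = (t.dropWhile (· = x)).count v := by
      intro v hv
      have h1 : (t.takeWhile (· = x)).count v = 0 :=
        List.count_eq_zero.mpr (fun h => hv (htw v h))
      have h0 : (x :: t).count v = t.count v := by
        simp [Ne.symm hv]
      rw [h0]
      conv_lhs => rw [hsplit]
      rw [List.count_append]
      omega
    rw [pvRuns_cons]
    refine ⟨?_, ?_, ?_⟩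
    · simp only [List.map_cons, List.nodup_cons]
      exact ⟨fun h => hxnot ((ih2 x).mp h), ih1⟩
    · intro v
      simp only [List.map_cons, List.mem_cons, ih2]
      constructor
      · rintro (rfl | h)
        · exact Or.inl rfl
        · exact Or.inr ((List.dropWhile_sublist _).subset h)
      · intro h
        rcases h with rfl | h'
        · exact Or.inl rfl
        · conv at h' => rw [hsplit]
          rcases List.mem_append.mp h' with h'' | h''
          · exact Or.inl (htw v h'')
          · exact Or.inr h''
    · simp only [List.map_cons]
      congr 1
      · rw [hcx]
      · conv_lhs => rw [ih3]
        apply List.map_congr_left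
        intro v hv
        have hvx : v ≠ x := fun h => hxnot (h ▸ (ih2 v).mp (by simpa using hv))
        rw [hcv v hvx]
termination_by s.length
decreasing_by
  simp only [List.length_cons, Nat.lt_succ_iff]
  exact List.length_dropWhile_le _ _

-- on a nondecreasing list, the run heads are strictly increasing
theorem pvRuns_fst_sorted (s : List Int) (hs : s.Pairwise (· ≤ ·)) :
    ((pvRuns s).map Prod.fst).Pairwise (· < ·) := by
  match s with
  | [] => simp [pvRuns]
  | x :: t =>
    have hge : ∀ y ∈ t, x ≤ y := fun y hy => List.rel_of_pairwise_cons hs hy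
    have hgt := mem_dropWhile_gt x t hs.tail hge
    have hdw : (t.dropWhile (· = x)).Pairwise (· ≤ ·) :=
      List.Pairwise.sublist (List.dropWhile_sublist _) hs.tail
    have hlen : (t.dropWhile (· = x)).length < (x :: t).length :=
      Nat.lt_succ_of_le (List.length_dropWhile_le _ _)
    have ih := pvRuns_fst_sorted (t.dropWhile (· = x)) hdw
    obtain ⟨_, ih2, _⟩ := pvRuns_spec (t.dropWhile (· = x)) hdw
    rw [pvRuns_cons]
    simp only [List.map_cons, List.pairwise_cons]
    exact ⟨fun v hv => hgt v ((ih2 v).mp hv), ih⟩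
termination_by s.length
decreasing_by
  simp only [List.length_cons, Nat.lt_succ_iff]
  exact List.length_dropWhile_le _ _

-- B's scan-with-(prev,run) accumulator, flushed at the end, is the bucket fold over the runs
theorem pvScan_eq (t : List Int) (b : PySem.Dict Int (List Int)) (v c : Int) (hc : 0 < c) :
    (fun (st : PySem.Dict Int (List Int) × Int × Int) =>
        if st.2.2 > 0 then pvPush st.1 st.2.2 st.2.1 else st.1)
      (t.foldl (fun (s : PySem.Dict Int (List Int) × Int × Int) v =>
        if s.2.2 > 0 ∧ v = s.2.1 then (s.1, s.2.1, s.2.2 + 1)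
        else ((if s.2.2 > 0 then pvPush s.1 s.2.2 s.2.1 else s.1), v, 1)) (b, v, c))
    = (pvRunsAux v c t).foldl (fun d p => pvPush d p.2 p.1) b := by
  induction t generalizing b v c with
  | nil => simp [pvRunsAux, hc]
  | cons x t ih =>
    by_cases hx : x = v
    · subst hx
      simp only [List.foldl_cons, pvRunsAux]
      simpa [hc] using ih b x (c + 1) (by omega)
    · simp only [List.foldl_cons, pvRunsAux, if_neg hx]
      simpa [hc, hx] using ih (pvPush b c v) x 1 one_pos

-- concatenating the per-key filters over distinct covering keys is a permutation
theorem pvFlatMap_filter_perm {α : Type} (key : α → Int) (cs : List Int) (P : List α)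
    (hnd : cs.Nodup) (hcov : ∀ p ∈ P, key p ∈ cs) :
    (cs.flatMap (fun c => P.filter (fun p => key p == c))).Perm P := by
  induction cs generalizing P with
  | nil =>
    cases P with
    | nil => simp
    | cons p t => exact absurd (hcov p List.mem_cons_self) (by simp)
  | cons c cs ih =>
    simp only [List.flatMap_cons]
    have hrest : ∀ c' ∈ cs, P.filter (fun p => key p == c')
        = (P.filter (fun p => !(key p == c))).filter (fun p => key p == c') := by
      intro c' hc'
      rw [List.filter_filter]
      apply List.filter_congr
      intro p _
      by_cases h : key p = c'
      · have : c' ≠ c := fun he => (List.nodup_cons.mp hnd).1 (he ▸ hc')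
        simp [h, this]
      · simp [h]
    have hmap : cs.flatMap (fun c' => P.filter (fun p => key p == c'))
        = cs.flatMap (fun c' => (P.filter (fun p => !(key p == c))).filter (fun p => key p == c')) :=
      List.flatMap_congr hrest
    rw [hmap]
    have hcov' : ∀ p ∈ P.filter (fun p => !(key p == c)), key p ∈ cs := by
      intro p hp
      obtain ⟨hpP, hpc⟩ := List.mem_filter.mp hp
      rcases List.mem_cons.mp (hcov p hpP) with h | h
      · exact absurd (by simp [h] : (key p == c) = true) (by simpa using hpc)
      · exact h
    exact ((ih _ (List.nodup_cons.mp hnd).2 hcov').append_left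
      (P.filter (fun p => key p == c))).trans (List.filter_append_perm _ P)


-- B's whole scan+flush is the bucket fold over the runs
theorem pvScanAll (l : List Int) :
    (fun (st : PySem.Dict Int (List Int) × Int × Int) =>
        if st.2.2 > 0 then pvPush st.1 st.2.2 st.2.1 else st.1)
      (l.foldl (fun (s : PySem.Dict Int (List Int) × Int × Int) v =>
        if s.2.2 > 0 ∧ v = s.2.1 then (s.1, s.2.1, s.2.2 + 1)
        else ((if s.2.2 > 0 then pvPush s.1 s.2.2 s.2.1 else s.1), v, 1)) (PySem.Dict.empty, 0, 0))
    = (pvRuns l).foldl (fun d p => pvPush d p.2 p.1) PySem.Dict.empty := by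
  cases l with
  | nil => simp [pvRuns]
  | cons x t =>
    have h1 : List.foldl (fun (s : PySem.Dict Int (List Int) × Int × Int) v =>
        if s.2.2 > 0 ∧ v = s.2.1 then (s.1, s.2.1, s.2.2 + 1)
        else ((if s.2.2 > 0 then pvPush s.1 s.2.2 s.2.1 else s.1), v, 1))
        (PySem.Dict.empty, 0, 0) (x :: t)
        = List.foldl (fun (s : PySem.Dict Int (List Int) × Int × Int) v =>
        if s.2.2 > 0 ∧ v = s.2.1 then (s.1, s.2.1, s.2.2 + 1)
        else ((if s.2.2 > 0 then pvPush s.1 s.2.2 s.2.1 else s.1), v, 1)) (PySem.Dict.empty, x, 1) t := by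
      rw [List.foldl_cons]
      norm_num
    rw [show pvRuns (x :: t) = pvRunsAux x 1 t from rfl, ← pvScan_eq t PySem.Dict.empty x 1 one_pos, h1]

-- beta-reduced restatement of pvScanAll (the shape the unfolded port presents)
theorem pvScanAll' (l : List Int) :
    (if (l.foldl (fun (s : PySem.Dict Int (List Int) × Int × Int) v =>
        if s.2.2 > 0 ∧ v = s.2.1 then (s.1, s.2.1, s.2.2 + 1)
        else ((if s.2.2 > 0 then pvPush s.1 s.2.2 s.2.1 else s.1), v, 1)) (PySem.Dict.empty, 0, 0)).2.2 > 0
     then pvPush (l.foldl (fun (s : PySem.Dict Int (List Int) × Int × Int) v =>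
        if s.2.2 > 0 ∧ v = s.2.1 then (s.1, s.2.1, s.2.2 + 1)
        else ((if s.2.2 > 0 then pvPush s.1 s.2.2 s.2.1 else s.1), v, 1)) (PySem.Dict.empty, 0, 0)).1
        (l.foldl (fun (s : PySem.Dict Int (List Int) × Int × Int) v =>
        if s.2.2 > 0 ∧ v = s.2.1 then (s.1, s.2.1, s.2.2 + 1)
        else ((if s.2.2 > 0 then pvPush s.1 s.2.2 s.2.1 else s.1), v, 1)) (PySem.Dict.empty, 0, 0)).2.2
        (l.foldl (fun (s : PySem.Dict Int (List Int) × Int × Int) v =>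
        if s.2.2 > 0 ∧ v = s.2.1 then (s.1, s.2.1, s.2.2 + 1)
        else ((if s.2.2 > 0 then pvPush s.1 s.2.2 s.2.1 else s.1), v, 1)) (PySem.Dict.empty, 0, 0)).2.1
     else (l.foldl (fun (s : PySem.Dict Int (List Int) × Int × Int) v =>
        if s.2.2 > 0 ∧ v = s.2.1 then (s.1, s.2.1, s.2.2 + 1)
        else ((if s.2.2 > 0 then pvPush s.1 s.2.2 s.2.1 else s.1), v, 1)) (PySem.Dict.empty, 0, 0)).1)
    = (pvRuns l).foldl (fun d p => pvPush d p.2 p.1) PySem.Dict.empty :=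
  pvScanAll l

-- the bucket dict built by the fold: contents and keys
theorem pvBuckets_getD (P : List (Int × Int)) (c : Int) :
    (P.foldl (fun d p => pvPush d p.2 p.1) PySem.Dict.empty).getD c []
      = (P.filter (fun p => p.2 == c)).map (·.1) := by
  have h : P.foldl (fun d p => pvPush d p.2 p.1) PySem.Dict.empty
      = (P.map Prod.swap).foldl (fun d p => d.modify p.1 [] (· ++ [p.2])) PySem.Dict.empty := by
    rw [List.foldl_map]; rfl
  rw [h, PySem.Dict.getD_foldl_modify_append]
  simp [List.filter_map, Function.comp_def]

theorem pvBuckets_keys (P : List (Int × Int)) :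
    (P.foldl (fun d p => pvPush d p.2 p.1) PySem.Dict.empty).keys
      = PySem.Set.ofList (P.map (·.2)) := by
  have h := PySem.Dict.keys_foldl_modify_key (l := P) (key := fun p => p.2) (d0 := ([] : List Int))
      (f := fun d p => (fun l => l ++ [p.1])) (d := PySem.Dict.empty)
  simp only [pvPush]
  rw [h]
  simp [PySem.Set.update_nil_left]

-- sorted2 with the (snd, fst) key is sorted with the lexicographic key
theorem sorted2_eq_sorted_lex (xs : List (Int × Int)) :
    PySem.List.sorted2 xs (fun p => p.2) (fun p => p.1)
      = PySem.List.sorted xs (fun p => toLex (p.2, p.1)) false := by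
  rw [PySem.List.sorted_eq_foldl_insertBy]
  show List.foldl (fun acc x => PySem.List.insertBy _ x acc) [] xs = _
  congr 1
  funext acc x
  congr 1
  funext a b
  show (decide (a.2 < b.2) || !decide (b.2 < a.2) && decide (a.1 < b.1))
      = decide (toLex (a.2, a.1) < toLex (b.2, b.1))
  have : toLex ((a.2 : Int), (a.1 : Int)) < toLex (b.2, b.1) ↔
      a.2 < b.2 ∨ (a.2 = b.2 ∧ a.1 < b.1) := Prod.Lex.lt_iff
  by_cases h1 : a.2 < b.2 <;> by_cases h2 : b.2 < a.2 <;> by_cases h3 : a.1 < b.1 <;>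
    simp [h1, h2, h3, this] <;> omega

-- A's counting loop builds Counter(filtered arr)
theorem foldA_eq_counter (arr : List Int) :
    arr.foldl (fun d i =>
        if i = 0 then d
        else if d.contains i then d.insert i (d.getD i 0 + 1) else d.insert i 1)
      PySem.Dict.empty
      = PySem.Dict.counter (arr.filter (fun x => x ≠ 0)) := by
  rw [← PySem.Dict.foldl_insert_getD_add_one_eq_counter]
  generalize PySem.Dict.empty = d
  induction arr generalizing d with
  | nil => rfl
  | cons i rest ih =>
    by_cases h0 : i = 0
    · simp [h0, ih]
    · simp only [List.foldl_cons, List.filter_cons, decide_eq_true_eq]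
      rw [if_neg h0, if_pos h0]
      simp only [List.foldl_cons]
      by_cases hc : d.contains i
      · rw [if_pos hc]; exact ih _
      · rw [if_neg hc]
        have : d.getD i 0 = 0 := by
          have hn : d.get? i = none := by
            rcases h : d.get? i with _ | v
            · rfl
            · refine absurd ?_ hc
              rw [PySem.Dict.contains_eq_isSome_get? d i, h]
              rfl
          simp [PySem.Dict.getD, hn]
        rw [show d.insert i 1 = d.insert i (d.getD i 0 + 1) by rw [this, zero_add]]
        exact ih _

-- A's break-at-100 flatten agrees with the full flatten after take 100
theorem flattenA_take (l : List (Int × Int)) (acc : List Int) :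
    (pvFlattenA l acc).take 100 = (acc ++ l.flatMap (fun p => [p.1, p.2])).take 100 := by
  induction l generalizing acc with
  | nil => simp [pvFlattenA]
  | cons p rest ih =>
    obtain ⟨a, b⟩ := p
    simp only [pvFlattenA]
    by_cases h : (acc ++ [a, b]).length ≥ 100
    · rw [if_pos h]
      rw [show (acc ++ ((a, b) :: rest).flatMap (fun p => [p.1, p.2]))
            = (acc ++ [a, b]) ++ rest.flatMap (fun p => [p.1, p.2]) by
          simp [List.flatMap_cons]]
      rw [List.take_append_of_le_length h]
    · rw [if_neg h, ih]
      congr 1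
      simp [List.flatMap_cons]

theorem new_sort_spec : Claim_equal_new_sort := by
  intro arr _
  unfold Spec_new_sort
  simp only [new_sort, new_sort_alt, foldA_eq_counter]
  set fs := arr.filter (fun x => decide (x ≠ 0)) with hfs
  set s := PySem.List.sorted fs (fun x => x) with hsdef
  rw [pvScanAll' s]
  set P := pvRuns s with hPdef
  have hs_perm : s.Perm fs := PySem.List.sorted_perm fs (fun x => x) false
  have hs_sorted : s.Pairwise (· ≤ ·) := by
    simpa using PySem.List.sorted_pairwise fs (fun x => x)
  obtain ⟨hVnd, hVmem, heq⟩ := pvRuns_spec s hs_sorted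
  have hVlt := pvRuns_fst_sorted s hs_sorted
  rw [← hPdef] at hVnd hVmem heq hVlt
  -- A's temp is Counter(fs).items
  have htemp : (PySem.Dict.counter fs).keys.map (fun j => (j, (PySem.Dict.counter fs).getD j 0))
      = (PySem.Set.ofList fs).map (fun k => (k, (fs.count k : Int))) := by
    rw [← PySem.Dict.items_eq_map_keys _ (PySem.Dict.nodup_keys_counter fs) 0,
      PySem.Dict.items_counter]
  rw [htemp, sorted2_eq_sorted_lex, pvBuckets_keys]
  simp only [pvBuckets_getD]
  set counts := PySem.List.sorted (PySem.Set.ofList (P.map (·.2))) (fun c => c) with hcounts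
  have hCntLt : counts.Pairwise (· < ·) := PySem.List.sorted_ofList_pairwise_lt (P.map (·.2))
  have hCntNd : counts.Nodup := hCntLt.imp (fun h => ne_of_lt h)
  have hCntMem : ∀ c, c ∈ counts ↔ c ∈ P.map (·.2) := fun c => by
    rw [hcounts, PySem.List.mem_sorted, PySem.Set.mem_ofList]
  -- the emission loops are a flatMap
  simp only [PySem.List.foldl_append_eq_flatMap, List.nil_append]
  -- B's emitted list is the concatenation of the per-count filters of the runs, flattened
  have hQeq : counts.flatMap (fun c => ((P.filter (fun p => p.2 == c)).map (·.1)).flatMap (fun v => [v, c]))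
      = (counts.flatMap (fun c => P.filter (fun p => p.2 == c))).flatMap (fun p => [p.1, p.2]) := by
    rw [List.flatMap_assoc]
    refine List.flatMap_congr (fun c _ => ?_)
    rw [List.flatMap_map]
    refine List.flatMap_congr (fun p hp => ?_)
    have : p.2 = c := by simpa using (List.mem_filter.mp hp).2
    rw [this]
  set Q := counts.flatMap (fun c => P.filter (fun p => p.2 == c)) with hQ
  -- Q is a permutation of A's temp
  have hQperm : Q.Perm P := pvFlatMap_filter_perm (fun p => p.2) counts P hCntNd
    (fun p hp => (hCntMem p.2).mpr (List.mem_map_of_mem hp))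
  have hVperm : (P.map Prod.fst).Perm (PySem.Set.ofList fs) := by
    rw [List.perm_ext_iff_of_nodup hVnd (PySem.Set.nodup_ofList fs)]
    intro v
    rw [hVmem v, PySem.Set.mem_ofList]
    exact hs_perm.mem_iff
  have hP2 : P = (P.map Prod.fst).map (fun v => (v, (fs.count v : Int))) := by
    conv_lhs => rw [heq]
    exact List.map_congr_left (fun v _ => by rw [hs_perm.count_eq v])
  have hPtemp : P.Perm ((PySem.Set.ofList fs).map (fun k => (k, (fs.count k : Int)))) := by
    rw [hP2]
    exact hVperm.map _
  -- Q is strictly increasing in the lexicographic (count, value) key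
  have hPfst : P.Pairwise (fun p q => p.1 < q.1) := by
    have h1 : ((P.map Prod.fst).map (fun v => (v, (fs.count v : Int)))).Pairwise
        (fun p q => p.1 < q.1) :=
      List.pairwise_map.mpr (hVlt.imp (fun h => by simpa using h))
    rw [← hP2] at h1
    exact h1
  have hQpw : Q.Pairwise (fun a b => (fun p : Int × Int => toLex (p.2, p.1)) a
      < (fun p : Int × Int => toLex (p.2, p.1)) b) := by
    rw [hQ]
    refine List.pairwise_flatMap.mpr ⟨fun c _ => ?_, ?_⟩
    · refine List.Pairwise.imp_of_mem ?_ (hPfst.filter _)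
      intro a b ha hb hab
      have h2a : a.2 = c := by simpa using (List.mem_filter.mp ha).2
      have h2b : b.2 = c := by simpa using (List.mem_filter.mp hb).2
      show toLex ((a.2 : Int), (a.1 : Int)) < toLex ((b.2 : Int), (b.1 : Int))
      exact Prod.Lex.lt_iff.mpr (Or.inr ⟨h2a.trans h2b.symm, hab⟩)
    · refine hCntLt.imp ?_
      intro c c' h x hx y hy
      have h2x : x.2 = c := by simpa using (List.mem_filter.mp hx).2
      have h2y : y.2 = c' := by simpa using (List.mem_filter.mp hy).2
      show toLex ((x.2 : Int), (x.1 : Int)) < toLex ((y.2 : Int), (y.1 : Int))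
      exact Prod.Lex.lt_iff.mpr (Or.inl (by rw [h2x, h2y]; exact h))
  have hSA : PySem.List.sorted ((PySem.Set.ofList fs).map (fun k => (k, (fs.count k : Int))))
      (fun p => toLex (p.2, p.1)) false = Q :=
    PySem.List.sorted_eq_of_perm_of_pairwise_lt _ _ _ (hQperm.trans hPtemp) hQpw
  rw [hQeq, hSA]
  -- break-at-100 flatten vs flatMap, then [:100]
  have h100 : (100 : Int) = ((100 : Nat) : Int) := by norm_num
  rw [h100, PySem.List.slice_to_natCast, PySem.List.slice_to_natCast]
  simpa using flattenA_take Q []
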